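-- pv_equiv track=rewrite | github.com/soreng25/phi-graph-pebbling-algorithms | phi-pebbling.py | generate_free_move_distributions
-- ===== SOURCE A (Python) =====
-- def generate_free_move_distributions(adj_matrix, initial_pebbles):
--     n = len(adj_matrix)
--     distributions = []
--
--     def backtrack(vertex_idx, current_dist, remaining_moves):
--         if vertex_idx == n:
--             distributions.append(current_dist.copy())
--             return
--
--         pebbles_at_vertex = initial_pebbles[vertex_idx]
--
--         if pebbles_at_vertex == 0:
--             backtrack(vertex_idx + 1, current_dist, remaining_moves)
--             return
--
--         possible_destinations = [vertex_idx]  # Can stay at same vertex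
--         for neighbor in range(n):
--             if adj_matrix[vertex_idx][neighbor] == 1:
--                 possible_destinations.append(neighbor)
--
--         def distribute_pebbles(pebbles_left, temp_dist):
--             if pebbles_left == 0:
--                 new_dist = current_dist.copy()
--                 for dest, count in temp_dist.items():
--                     new_dist[dest] += count
--                 backtrack(vertex_idx + 1, new_dist, remaining_moves)
--                 return
--
--             # Try placing next pebble at each possible destination
--             for dest in possible_destinations:
--                 temp_dist[dest] = temp_dist.get(dest, 0) + 1
--                 distribute_pebbles(pebbles_left - 1, temp_dist)
--                 temp_dist[dest] -= 1
--                 if temp_dist[dest] == 0: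
--                     del temp_dist[dest]
--
--         distribute_pebbles(pebbles_at_vertex, {})
--
--     backtrack(0, [0] * n, sum(initial_pebbles))
--     return distributions
-- ===== SOURCE B (Python) =====
-- def generate_free_move_distributions(adj_matrix, initial_pebbles):
--     # Iterative cross-product: per vertex build the list of contribution
--     # vectors (one per ordered pebble-destination tuple), then extend every
--     # partial distribution by every contribution. No recursion, no dicts.
--     n = len(adj_matrix)
--     dists = [[0] * n]
--     for v in range(n):
--         p = initial_pebbles[v]
--         if p == 0:
--             continue
--         dests = [v] + [u for u in range(n) if adj_matrix[v][u] == 1]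
--         contribs = [[0] * n]
--         for _ in range(p):
--             step = []
--             for c in contribs:
--                 for d in dests:
--                     c2 = c.copy()
--                     c2[d] += 1
--                     step.append(c2)
--             contribs = step
--         dists = [[x + y for x, y in zip(dist, c)] for dist in dists for c in contribs]
--     return dists
-- ===== Notes on version B (the rewrite author's own statement) =====
-- stated objective: simpler
-- what changed: Replaces A's mutual backtracking recursion (nested closures with a temp dict of pebble moves mutated and undone in place) by a flat iterative construction: per vertex, build all contribution count-vectors by repeated extension, then cross-combine them with the accumulated distributions.
import Mathlib
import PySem

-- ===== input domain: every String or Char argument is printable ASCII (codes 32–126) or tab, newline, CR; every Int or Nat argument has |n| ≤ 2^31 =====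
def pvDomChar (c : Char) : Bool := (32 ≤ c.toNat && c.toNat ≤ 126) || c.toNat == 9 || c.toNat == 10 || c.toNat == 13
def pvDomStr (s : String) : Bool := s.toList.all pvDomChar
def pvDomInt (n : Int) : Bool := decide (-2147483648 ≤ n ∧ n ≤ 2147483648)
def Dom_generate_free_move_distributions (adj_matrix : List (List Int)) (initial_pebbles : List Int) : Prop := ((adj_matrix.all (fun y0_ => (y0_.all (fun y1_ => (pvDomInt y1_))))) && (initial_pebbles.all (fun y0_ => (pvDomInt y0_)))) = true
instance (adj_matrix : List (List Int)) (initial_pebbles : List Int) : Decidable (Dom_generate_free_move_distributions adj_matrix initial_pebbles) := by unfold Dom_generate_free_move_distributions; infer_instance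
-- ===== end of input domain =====

-- B replaces A's mutual backtracking recursion (with a dict of pebble moves undone in place)
-- by an iterative cross-product of per-vertex contribution vectors (objective: simpler).

-- ===== PORT A =====
-- shared elementary helper: `l[i] += c` (exact for 0 ≤ i < l.length, the only indices reached)
def pvSetAdd (l : List Int) (i : Nat) (c : Int) : List Int :=
  l.set i (l.getD i 0 + c)

-- A's possible_destinations loop: [vertex_idx] then every neighbor u < n with adj[v][u] == 1
def pvDestsA (adj : List (List Int)) (n v : Nat) : List Int :=
  (List.range n).foldl
    (fun acc u => if (adj.getD v []).getD u 0 = 1 then acc ++ [(u : Int)] else acc)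
    [(v : Int)]

mutual
-- A's backtrack(vertex_idx, current_dist, remaining_moves); verts = the vertex indices still to process
def pvBacktrackA (adj : List (List Int)) (peb : List Int) (n : Nat)
    (verts : List Nat) (cur : List Int) (rem : Int) : List (List Int) :=
  match verts with
  | [] => [cur]
  | v :: rest =>
    let p := peb.getD v 0   -- initial_pebbles[vertex_idx]; exact under Pre_
    if p = 0 then pvBacktrackA adj peb n rest cur rem
    else pvDistributeA adj peb n rest cur rem (pvDestsA adj n v) p.toNat PySem.Dict.empty
termination_by (verts.length, 1, 0)

-- A's distribute_pebbles(pebbles_left, temp_dist); the in-place +1/-1/del undo of Python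
-- is expressed by passing the incremented dict down and reusing the old one afterwards
def pvDistributeA (adj : List (List Int)) (peb : List Int) (n : Nat)
    (rest : List Nat) (cur : List Int) (rem : Int) (dests : List Int)
    (pl : Nat) (temp : PySem.Dict Int Int) : List (List Int) :=
  match pl with
  | 0 =>
    let newDist := temp.items.foldl (fun d pr => pvSetAdd d pr.1.toNat pr.2) cur
    pvBacktrackA adj peb n rest newDist rem
  | pl' + 1 =>
    dests.foldl
      (fun acc dest =>
        acc ++ pvDistributeA adj peb n rest cur rem dests pl'
                 (temp.insert dest (temp.getD dest 0 + 1)))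
      []
termination_by (rest.length + 1, 0, pl)
end

def generate_free_move_distributions (adj_matrix : List (List Int)) (initial_pebbles : List Int) : List (List Int) :=
  let n := adj_matrix.length
  pvBacktrackA adj_matrix initial_pebbles n (List.range n) (List.replicate n 0) initial_pebbles.sum

-- ===== PORT B =====
def generate_free_move_distributions_alt (adj_matrix : List (List Int)) (initial_pebbles : List Int) : List (List Int) :=
  let n := adj_matrix.length
  (List.range n).foldl
    (fun dists v =>
      let p := initial_pebbles.getD v 0
      if p = 0 then dists
      else
        let dests : List Int :=
          (v : Int) :: ((List.range n).filter (fun u => (adj_matrix.getD v []).getD u 0 = 1)).map (fun u => (u : Int))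
        let contribs :=
          (List.range p.toNat).foldl
            (fun cs _ =>
              cs.foldl (fun step c =>
                dests.foldl (fun step d => step ++ [pvSetAdd c d.toNat 1]) step) [])
            [List.replicate n 0]
        dists.flatMap (fun dist => contribs.map (fun c => List.zipWith (· + ·) dist c)))
    [List.replicate n 0]

-- ===== PRECONDITION & SPEC =====
-- Pre_ excludes exactly the inputs where the Python A raises: initial_pebbles shorter than
-- the matrix (IndexError), a negative pebble count (unbounded recursion → RecursionError),
-- and a row shorter than n on a vertex that actually holds pebbles (IndexError).
def Pre_generate_free_move_distributions (adj_matrix : List (List Int)) (initial_pebbles : List Int) : Prop :=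
  adj_matrix.length ≤ initial_pebbles.length ∧
  ∀ v ∈ List.range adj_matrix.length,
    0 ≤ initial_pebbles.getD v 0 ∧
    (initial_pebbles.getD v 0 ≠ 0 → adj_matrix.length ≤ (adj_matrix.getD v []).length)
instance (adj_matrix : List (List Int)) (initial_pebbles : List Int) : Decidable (Pre_generate_free_move_distributions adj_matrix initial_pebbles) := by unfold Pre_generate_free_move_distributions; infer_instance

def pvWitness_generate_free_move_distributions : List (List Int) × List Int := ([[0, 1], [1, 0]], [1, 0])

def Spec_generate_free_move_distributions (adj_matrix : List (List Int)) (initial_pebbles : List Int) (out : List (List Int)) : Prop := out = generate_free_move_distributions_alt adj_matrix initial_pebbles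
instance (adj_matrix : List (List Int)) (initial_pebbles : List Int) (out : List (List Int)) : Decidable (Spec_generate_free_move_distributions adj_matrix initial_pebbles out) := by unfold Spec_generate_free_move_distributions; infer_instance

-- ===== CLAIM (what is proved, stated in full; the proofs are below) =====
def Claim_equal_generate_free_move_distributions : Prop := ∀ (adj_matrix : List (List Int)) (initial_pebbles : List Int), Dom_generate_free_move_distributions adj_matrix initial_pebbles → Pre_generate_free_move_distributions adj_matrix initial_pebbles → Spec_generate_free_move_distributions adj_matrix initial_pebbles (generate_free_move_distributions adj_matrix initial_pebbles)

-- ===== LEMMAS AND PROOFS =====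

-- ---- elementary facts about pvSetAdd ----
theorem pvSetAdd_length (l : List Int) (i : Nat) (c : Int) : (pvSetAdd l i c).length = l.length := by
  simp [pvSetAdd]

theorem pvSetAdd_getElem (l : List Int) (i : Nat) (c : Int) (k : Nat) (hk : k < l.length) :
    (pvSetAdd l i c)[k]'(by rwa [pvSetAdd_length]) = if i = k then l[k] + c else l[k] := by
  simp only [pvSetAdd, List.getElem_set]
  split
  · next h => subst h; rw [List.getD_eq_getElem l 0 hk]
  · rfl
theorem pvSetAdd_comm (l : List Int) (i j : Nat) (a b : Int) :
    pvSetAdd (pvSetAdd l i a) j b = pvSetAdd (pvSetAdd l j b) i a := by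
  apply List.ext_getElem
  · simp [pvSetAdd_length]
  · intro k h1 h2
    have hk : k < l.length := by simpa [pvSetAdd_length] using h1
    simp only [pvSetAdd_getElem _ _ _ _ (by simpa [pvSetAdd_length] : k < (pvSetAdd l i a).length),
      pvSetAdd_getElem _ _ _ _ (by simpa [pvSetAdd_length] : k < (pvSetAdd l j b).length),
      pvSetAdd_getElem _ _ _ _ hk]
    split_ifs <;> ring
theorem pvSetAdd_merge (l : List Int) (i : Nat) (a b : Int) :
    pvSetAdd (pvSetAdd l i a) i b = pvSetAdd l i (a + b) := by
  apply List.ext_getElem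
  · simp [pvSetAdd_length]
  · intro k h1 h2
    have hk : k < l.length := by simpa [pvSetAdd_length] using h1
    simp only [pvSetAdd_getElem _ _ _ _ (by simpa [pvSetAdd_length] : k < (pvSetAdd l i a).length),
      pvSetAdd_getElem _ _ _ _ hk]
    split_ifs <;> ring
theorem pvZip_replicate (l : List Int) (n : Nat) (h : l.length = n) :
    List.zipWith (· + ·) l (List.replicate n (0 : Int)) = l := by
  subst h
  induction l with
  | nil => rfl
  | cons x t ih => simp [List.replicate_succ, ih]
theorem pvZip_setAdd (a b : List Int) (h : a.length = b.length) (i : Nat) (x : Int) :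
    List.zipWith (· + ·) (pvSetAdd a i x) b = List.zipWith (· + ·) a (pvSetAdd b i x) := by
  apply List.ext_getElem
  · simp [pvSetAdd_length]
  · intro k h1 h2
    have hka : k < a.length := by simp [pvSetAdd_length] at h1; omega
    have hkb : k < b.length := by omega
    simp only [List.getElem_zipWith, pvSetAdd_getElem _ _ _ _ hka, pvSetAdd_getElem _ _ _ _ hkb]
    split_ifs <;> ring

-- ---- applying a dict of (destination, count) items to a distribution ----
def pvApply (cur : List Int) (its : List (Int × Int)) : List Int :=
  its.foldl (fun d pr => pvSetAdd d pr.1.toNat pr.2) cur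

theorem pvApply_length (its : List (Int × Int)) (cur : List Int) :
    (pvApply cur its).length = cur.length := by
  induction its generalizing cur with
  | nil => rfl
  | cons p t ih => simp [pvApply, List.foldl_cons] at *; rw [ih, pvSetAdd_length]

theorem pvApply_setAdd (its : List (Int × Int)) (cur : List Int) (i : Nat) (x : Int) :
    pvApply (pvSetAdd cur i x) its = pvSetAdd (pvApply cur its) i x := by
  induction its generalizing cur with
  | nil => rfl
  | cons p t ih => simp only [pvApply, List.foldl_cons] at *; rw [pvSetAdd_comm, ih]

theorem pvApply_replace (d c : Int) (its : List (Int × Int)) (cur : List Int)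
    (hnd : (its.map Prod.fst).Nodup) (hmem : (d, c) ∈ its) :
    pvApply cur (its.map (fun p => if p.1 == d then (d, c + 1) else p)) =
      pvSetAdd (pvApply cur its) d.toNat 1 := by
  induction its generalizing cur with
  | nil => simp at hmem
  | cons p t ih =>
    obtain ⟨k, a⟩ := p
    simp only [List.map, List.nodup_cons] at hnd
    by_cases hkd : k = d
    · subst hkd
      have hca : c = a := by
        rcases List.mem_cons.mp hmem with h | h
        · exact (Prod.mk.injEq _ _ _ _ ▸ h).2
        · exact absurd (List.mem_map.mpr ⟨(k, c), h, rfl⟩) hnd.1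
      subst hca
      have ht : t.map (fun p => if p.1 == k then (k, c + 1) else p) = t := by
        apply List.map_congr_left ?_ |>.trans (List.map_id t)
        intro p hp
        have : p.1 ≠ k := fun h => hnd.1 (List.mem_map.mpr ⟨p, hp, h⟩)
        simp [this]
      simp only [List.map_cons, beq_self_eq_true, ht]
      show pvApply (pvSetAdd cur k.toNat (c + 1)) t = _
      rw [pvApply_setAdd]
      show _ = pvSetAdd (pvApply (pvSetAdd cur k.toNat c) t) k.toNat 1
      rw [pvApply_setAdd, pvSetAdd_merge]
    · have hmem' : (d, c) ∈ t := by
        rcases List.mem_cons.mp hmem with h | h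
        · exact absurd (congrArg Prod.fst h).symm hkd
        · exact h
      have hne : (k == d) = false := beq_eq_false_iff_ne.mpr hkd
      simp only [List.map_cons, hne, Bool.false_eq_true, if_false]
      show pvApply (pvSetAdd cur k.toNat a) (t.map _) = pvSetAdd (pvApply (pvSetAdd cur k.toNat a) t) d.toNat 1
      exact ih _ hnd.2 hmem'

theorem pvApply_insert (temp : PySem.Dict Int Int) (cur : List Int) (d : Int)
    (hnd : temp.keys.Nodup) :
    pvApply cur ((temp.insert d (temp.getD d 0 + 1)).items) =
      pvSetAdd (pvApply cur temp.items) d.toNat 1 := by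
  by_cases hc : temp.contains d = true
  · have hd : d ∈ temp.items.map Prod.fst := by
      have := (PySem.Dict.contains_iff_mem_keys temp d).mp hc
      simpa [PySem.Dict.keys] using this
    obtain ⟨p, hp, hp1⟩ := List.mem_map.mp hd
    obtain ⟨k, a⟩ := p
    have hp' : (d, a) ∈ temp.items := by rwa [show k = d from hp1] at hp
    have hgd : temp.getD d 0 = a := PySem.Dict.getD_of_mem_items temp hp' hnd 0
    rw [PySem.Dict.items_insert_of_contains temp _ hc, hgd]
    exact pvApply_replace d a temp.items cur (by simpa [PySem.Dict.keys] using hnd) hp' 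
  · have hc' : temp.contains d = false := by simpa using hc
    rw [PySem.Dict.items_insert_of_not_contains temp _ hc',
        PySem.Dict.getD_of_not_contains temp 0 hc']
    show pvApply cur (temp.items ++ [(d, 0 + 1)]) = _
    rw [pvApply, List.foldl_append]
    show pvSetAdd (pvApply cur temp.items) d.toNat (0 + 1) = _
    norm_num

-- ---- the per-vertex contribution vectors of B ----
def pvInc (dests : List Int) (cs : List (List Int)) : List (List Int) :=
  cs.flatMap (fun c => dests.map (fun d => pvSetAdd c d.toNat 1))

def pvFiter (dests : List Int) (n k : Nat) : List (List Int) :=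
  (List.range k).foldl (fun cs _ => pvInc dests cs) [List.replicate n 0]

theorem pvFiter_succ (dests : List Int) (n k : Nat) :
    pvFiter dests n (k + 1) = pvInc dests (pvFiter dests n k) := by
  simp [pvFiter, List.range_succ]

theorem pvFiter_len (dests : List Int) (n k : Nat) :
    ∀ w ∈ pvFiter dests n k, w.length = n := by
  induction k with
  | zero => intro w hw; simp [pvFiter] at hw; simp [hw]
  | succ k ih =>
    intro w hw
    rw [pvFiter_succ] at hw
    simp only [pvInc, List.mem_flatMap, List.mem_map] at hw
    obtain ⟨c, hc, d, _, rfl⟩ := hw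
    rw [pvSetAdd_length]; exact ih c hc

theorem pvFiter_front (dests : List Int) (n k : Nat) :
    pvFiter dests n (k + 1) =
      dests.flatMap (fun d => (pvFiter dests n k).map (fun c => pvSetAdd c d.toNat 1)) := by
  induction k with
  | zero =>
    rw [pvFiter_succ]
    show pvInc dests [List.replicate n 0] = _
    simp [pvInc, pvFiter, List.flatMap_cons, ← List.map_eq_flatMap]
  | succ k ih =>
    rw [pvFiter_succ]
    conv_lhs => rw [ih]
    conv_rhs => rw [pvFiter_succ]
    simp only [pvInc, List.flatMap_assoc, List.flatMap_map, List.map_flatMap, List.map_map]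
    apply List.flatMap_congr; intro d _
    apply List.flatMap_congr; intro c _
    apply List.map_congr_left; intro d' _
    simp only [Function.comp]
    rw [pvSetAdd_comm]

-- ---- B as a fold over vertices ----
def pvDests (adj : List (List Int)) (n v : Nat) : List Int :=
  (v : Int) :: ((List.range n).filter (fun u => (adj.getD v []).getD u 0 = 1)).map (fun u => (u : Int))

theorem pvDestsA_eq (adj : List (List Int)) (n v : Nat) : pvDestsA adj n v = pvDests adj n v := by
  rw [pvDestsA, pvDests]
  have h := PySem.List.foldl_append_if (fun u : Nat => decide ((adj.getD v []).getD u 0 = 1))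
    (fun u : Nat => (u : Int)) (List.range n) [(v : Int)]
  simpa [← List.map_eq_flatMap] using h

-- the inner two loops of B's contribs step are pvInc
theorem pvIncFold (dests : List Int) (cs acc : List (List Int)) :
    cs.foldl (fun step c => dests.foldl (fun step d => step ++ [pvSetAdd c d.toNat 1]) step) acc =
      acc ++ pvInc dests cs := by
  induction cs generalizing acc with
  | nil => simp [pvInc]
  | cons c cs ih =>
    rw [List.foldl_cons, PySem.List.foldl_append_singleton_eq_map, ih]
    simp [pvInc, List.append_assoc]

theorem pvContribs_eq (dests : List Int) (n k : Nat) :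
    (List.range k).foldl
        (fun cs _ =>
          cs.foldl (fun step c =>
            dests.foldl (fun step d => step ++ [pvSetAdd c d.toNat 1]) step) [])
        [List.replicate n 0] = pvFiter dests n k := by
  rw [pvFiter]
  have hfun : (fun (cs : List (List Int)) (_ : Nat) =>
      cs.foldl (fun step c => dests.foldl (fun step d => step ++ [pvSetAdd c d.toNat 1]) step) []) =
      fun cs _ => pvInc dests cs := by
    funext cs x; simpa using pvIncFold dests cs []
  rw [hfun]

def pvStepB (adj : List (List Int)) (peb : List Int) (n : Nat)
    (dists : List (List Int)) (v : Nat) : List (List Int) :=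
  let p := peb.getD v 0
  if p = 0 then dists
  else
    let dests : List Int :=
      (v : Int) :: ((List.range n).filter (fun u => (adj.getD v []).getD u 0 = 1)).map (fun u => (u : Int))
    let contribs :=
      (List.range p.toNat).foldl
        (fun cs _ =>
          cs.foldl (fun step c =>
            dests.foldl (fun step d => step ++ [pvSetAdd c d.toNat 1]) step) [])
        [List.replicate n 0]
    dists.flatMap (fun dist => contribs.map (fun c => List.zipWith (· + ·) dist c))

theorem pvAlt_eq (adj : List (List Int)) (peb : List Int) :
    generate_free_move_distributions_alt adj peb =
      (List.range adj.length).foldl (pvStepB adj peb adj.length) [List.replicate adj.length 0] := rfl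

theorem pvStepB_eq (adj : List (List Int)) (peb : List Int) (n : Nat)
    (dists : List (List Int)) (v : Nat) :
    pvStepB adj peb n dists v =
      if peb.getD v 0 = 0 then dists
      else dists.flatMap (fun dist =>
        (pvFiter (pvDests adj n v) n (peb.getD v 0).toNat).map
          (fun c => List.zipWith (· + ·) dist c)) := by
  simp only [pvStepB, pvDests, pvContribs_eq]

theorem pvStepB_append (adj : List (List Int)) (peb : List Int) (n : Nat)
    (xs ys : List (List Int)) (v : Nat) :
    pvStepB adj peb n (xs ++ ys) v = pvStepB adj peb n xs v ++ pvStepB adj peb n ys v := by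
  rw [pvStepB_eq, pvStepB_eq, pvStepB_eq]
  split <;> simp

theorem pvFoldB_append (adj : List (List Int)) (peb : List Int) (n : Nat)
    (verts : List Nat) (xs ys : List (List Int)) :
    verts.foldl (pvStepB adj peb n) (xs ++ ys) =
      verts.foldl (pvStepB adj peb n) xs ++ verts.foldl (pvStepB adj peb n) ys := by
  induction verts generalizing xs ys with
  | nil => rfl
  | cons v rest ih => simp only [List.foldl_cons, pvStepB_append]; exact ih _ _

theorem pvFoldB_nil (adj : List (List Int)) (peb : List Int) (n : Nat) (verts : List Nat) :
    verts.foldl (pvStepB adj peb n) [] = [] := by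
  induction verts with
  | nil => rfl
  | cons v rest ih => simp only [List.foldl_cons, pvStepB_eq]; split <;> simpa

theorem pvFoldB_flatten (adj : List (List Int)) (peb : List Int) (n : Nat)
    (verts : List Nat) (D : List (List Int)) :
    verts.foldl (pvStepB adj peb n) D =
      D.flatMap (fun c => verts.foldl (pvStepB adj peb n) [c]) := by
  induction D with
  | nil => simp [pvFoldB_nil]
  | cons c D ih =>
    have : c :: D = [c] ++ D := rfl
    rw [this, pvFoldB_append, List.flatMap_append, ← ih]
    simp

-- ---- the central correspondence: distribute_pebbles vs contribution vectors ----
theorem pvDV (adj : List (List Int)) (peb : List Int) (n : Nat) (rest : List Nat)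
    (rem : Int) (dests : List Int) :
    ∀ (pl : Nat) (temp : PySem.Dict Int Int) (cur : List Int), cur.length = n →
      temp.keys.Nodup →
      pvDistributeA adj peb n rest cur rem dests pl temp =
        (pvFiter dests n pl).flatMap (fun w =>
          pvBacktrackA adj peb n rest (List.zipWith (· + ·) (pvApply cur temp.items) w) rem) := by
  intro pl
  induction pl with
  | zero =>
    intro temp cur hlen hnd
    rw [pvDistributeA]
    show pvBacktrackA adj peb n rest (pvApply cur temp.items) rem = _
    rw [pvFiter]
    simp only [List.range_zero, List.foldl_nil, List.flatMap_cons, List.flatMap_nil,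
      List.append_nil]
    rw [pvZip_replicate _ _ (by rw [pvApply_length]; exact hlen)]
  | succ pl ih =>
    intro temp cur hlen hnd
    have hX : (pvApply cur temp.items).length = n := by rw [pvApply_length]; exact hlen
    rw [pvDistributeA, PySem.List.foldl_append_eq_flatMap, List.nil_append,
      pvFiter_front, List.flatMap_assoc]
    apply List.flatMap_congr; intro d _
    rw [ih (temp.insert d (temp.getD d 0 + 1)) cur hlen (PySem.Dict.nodup_keys_insert temp d _ hnd),
      pvApply_insert temp cur d hnd, List.flatMap_map]
    apply List.flatMap_congr; intro w hw
    rw [pvZip_setAdd _ _ (by rw [hX, pvFiter_len dests n pl w hw])]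

-- ---- main induction over the vertex list ----
theorem pvMain (adj : List (List Int)) (peb : List Int) (n : Nat) (rem : Int) :
    ∀ (verts : List Nat) (cur : List Int), cur.length = n →
      pvBacktrackA adj peb n verts cur rem = verts.foldl (pvStepB adj peb n) [cur] := by
  intro verts
  induction verts with
  | nil => intro cur hlen; rw [pvBacktrackA]; rfl
  | cons v rest ih =>
    intro cur hlen
    rw [pvBacktrackA, List.foldl_cons, pvStepB_eq]
    by_cases hp : peb.getD v 0 = 0
    · simp only [hp, if_true]
      exact ih cur hlen
    · simp only [hp, if_false]
      rw [pvDestsA_eq,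
        pvDV adj peb n rest rem (pvDests adj n v) (peb.getD v 0).toNat PySem.Dict.empty cur hlen
          PySem.Dict.nodup_keys_empty]
      show (pvFiter (pvDests adj n v) n (peb.getD v 0).toNat).flatMap
          (fun w => pvBacktrackA adj peb n rest (List.zipWith (· + ·) cur w) rem) = _
      rw [pvFoldB_flatten, List.flatMap_cons, List.flatMap_nil, List.append_nil, List.flatMap_map]
      apply List.flatMap_congr; intro w hw
      exact ih _ (by rw [List.length_zipWith, hlen, pvFiter_len _ _ _ w hw]; exact Nat.min_self n)

-- ===== VERDICT (by name: the statement is the Claim_ definition above) =====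
theorem generate_free_move_distributions_spec : Claim_equal_generate_free_move_distributions := by
  intro adj peb _dom _pre
  unfold Spec_generate_free_move_distributions
  rw [pvAlt_eq]
  show pvBacktrackA adj peb adj.length (List.range adj.length) (List.replicate adj.length 0) peb.sum = _
  exact pvMain adj peb adj.length peb.sum _ _ (List.length_replicate)
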